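-- pv_equiv track=rewrite | github.com/yermandy/GenD | detector.py | max_spread_permutation_pq
-- ===== SOURCE A (Python) =====
-- import heapq
--
-- def max_spread_permutation_pq(N, start=0):
--     """
--     Generate a permutation of 0..N-1 such that at each step
--     the next element is the one whose minimum distance to
--     all previously chosen elements is maximized, using a
--     priority queue to speed up selection.
--
--     Args:
--         N (int): Length of the permutation.
--         start (int): The first element in the permutation (default 0).
--
--     Returns:
--         List[int]: A list representing the permutation.
--     """
--     if not (0 <= start < N):
--         raise ValueError("`start` must be in the range [0, N-1]")
--
--     # Initialize chosen list and distance map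
--     chosen = [start]
--     dist = {i: abs(i - start) for i in range(N) if i != start}
--
--     # Build a max-heap (use negative distances for heapq)
--     heap = [(-d, i) for i, d in dist.items()]
--     heapq.heapify(heap)
--
--     # Greedily pick elements
--     while heap:
--         # Pop until we find a valid (up-to-date) entry
--         while True:
--             neg_d, candidate = heapq.heappop(heap)
--             current = -neg_d
--             # Only accept if it matches the latest dist
--             if dist.get(candidate, -1) == current:
--                 break
--
--         # Add the selected candidate
--         chosen.append(candidate)
--         # Remove it from dist-map
--         del dist[candidate]
--
--         # Update distances for remaining elements
--         for other in list(dist.keys()):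
--             new_d = abs(other - candidate)
--             if new_d < dist[other]:
--                 dist[other] = new_d
--                 heapq.heappush(heap, (-new_d, other))
--
--     return chosen
-- ===== SOURCE B (Python) =====
-- def max_spread_permutation_pq(N, start=0):
--     """
--     Interval-splitting re-implementation: every maximal stretch of unpicked
--     points contributes a deterministic tree of (distance, index) picks, and
--     the greedy pop order is exactly one sort of all picks by (-dist, index).
--     """
--     if not (0 <= start < N):
--         raise ValueError("`start` must be in the range [0, N-1]")
--
--     def interior(a, b):
--         # picks inside the open interval (a, b): leftmost midpoint first
--         if b - a < 2:
--             return []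
--         d = (b - a) // 2
--         m = a + d
--         return [(d, m)] + interior(a, m) + interior(m, b)
--
--     keyed = []
--     if start > 0:
--         keyed += [(start, 0)] + interior(0, start)
--     if start < N - 1:
--         keyed += [(N - 1 - start, N - 1)] + interior(start, N - 1)
--     keyed.sort(key=lambda t: (-t[0], t[1]))
--     return [start] + [i for _, i in keyed]
-- ===== Notes on version B (the rewrite author's own statement) =====
-- stated objective: faster
-- what changed: Replaces the lazy-deletion max-heap greedy with its per-step rescan of the whole distance map by recursive interval splitting that assigns every index its final pick distance directly, followed by a single sort of all (distance, index) picks by (-distance, index).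
import Mathlib
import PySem

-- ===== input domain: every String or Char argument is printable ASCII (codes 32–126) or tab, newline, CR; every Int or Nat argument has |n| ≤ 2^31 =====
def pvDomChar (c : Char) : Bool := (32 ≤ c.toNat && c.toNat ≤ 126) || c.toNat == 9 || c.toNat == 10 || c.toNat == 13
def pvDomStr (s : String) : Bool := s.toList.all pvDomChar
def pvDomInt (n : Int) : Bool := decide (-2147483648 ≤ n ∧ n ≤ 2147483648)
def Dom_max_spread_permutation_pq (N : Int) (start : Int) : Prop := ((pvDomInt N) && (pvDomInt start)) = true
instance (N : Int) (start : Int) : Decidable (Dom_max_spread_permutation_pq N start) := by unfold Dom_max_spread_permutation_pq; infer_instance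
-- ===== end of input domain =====

-- B replaces A's O(N^2)-work lazy-deletion heap greedy by interval splitting plus one sort
-- of all (distance, index) picks (objective: faster, asymptotically).

-- ===== PORT A =====
-- The heapq heap is ported as a plain list of (neg-dist, index) entries; `heappop` removes
-- the smallest entry under Python's tuple order (exact here: all live entries are distinct
-- pairs, so the sequence of popped values is fully determined by that order and does not
-- depend on the binary-heap layout); `heapify` keeps the multiset, `heappush` appends.
def pvKeyLt (p q : Int × Int) : Bool := p.1 < q.1 || (p.1 == q.1 && p.2 < q.2)

def pvHeapMin (h : Int × Int) (t : List (Int × Int)) : Int × Int :=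
  t.foldl (fun m x => if pvKeyLt x m then x else m) h

-- inner `while True` pop loop; fuel = heap size (each pop shrinks the heap)
def pvPopLoop : Nat → PySem.Dict Int Int → List (Int × Int) → Option ((Int × Int) × List (Int × Int))
  | 0, _, _ => none
  | fuel+1, dist, heap =>
    match heap with
    | [] => none  -- heappop on an empty heap: Python raises IndexError (never reached from the entry point)
    | h :: t =>
      let m := pvHeapMin h t
      let current := -m.1
      if PySem.Dict.getD dist m.2 (-1) == current then some ((m.2, current), (h :: t).erase m)
      else pvPopLoop fuel dist ((h :: t).erase m)

-- body of `for other in list(dist.keys())`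
def pvUpdStep (cand : Int) (st : PySem.Dict Int Int × List (Int × Int)) (other : Int) :
    PySem.Dict Int Int × List (Int × Int) :=
  let newD := |other - cand|
  match st.1.get? other with
  | some cur => if newD < cur then (st.1.insert other newD, st.2 ++ [(-newD, other)]) else st
  | none => st  -- dist[other] would raise KeyError (never happens: iterated keys stay present)

-- outer `while heap` loop; fuel = number of keys of dist (one key is deleted per iteration)
def pvLoopA : Nat → PySem.Dict Int Int → List (Int × Int) → List Int → List Int
  | 0, _, _, chosen => chosen
  | fuel+1, dist, heap, chosen =>
    match heap with
    | [] => chosen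
    | h :: t =>
      match pvPopLoop (h :: t).length dist (h :: t) with
      | none => chosen  -- Python would raise IndexError here (never reached from the entry point)
      | some ((cand, _current), heap1) =>
        let dist1 := dist.erase cand
        let st := dist1.keys.foldl (pvUpdStep cand) (dist1, heap1)
        pvLoopA fuel st.1 st.2 (chosen ++ [cand])

def max_spread_permutation_pq (N : Int) (start : Int) : List Int :=
  if 0 ≤ start ∧ start < N then
    let dist : PySem.Dict Int Int :=
      ((PySem.List.pyRange 0 N 1).filter (fun i => decide (i ≠ start))).foldl
        (fun d i => d.insert i |i - start|) PySem.Dict.empty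
    let heap := dist.items.map (fun p => (-p.2, p.1))
    pvLoopA dist.items.length dist heap [start]
  else []  -- Python raises ValueError here (excluded by Pre_)

-- ===== PORT B =====
-- picks inside the open interval (a, b): leftmost midpoint first, then both halves
def pvPicksI (a b : Int) : List (Int × Int) :=
  if b - a < 2 then []
  else
    (PySem.Int.floordiv (b - a) 2, a + PySem.Int.floordiv (b - a) 2) ::
      (pvPicksI a (a + PySem.Int.floordiv (b - a) 2) ++
        pvPicksI (a + PySem.Int.floordiv (b - a) 2) b)
termination_by (b - a).toNat
decreasing_by
  all_goals
    (rw [PySem.Int.floordiv_eq_ediv_of_pos (by norm_num : (0:Int) < 2)] at *; omega)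

def max_spread_permutation_pq_alt (N : Int) (start : Int) : List Int :=
  if 0 ≤ start ∧ start < N then
    let keyed :=
      (if 0 < start then (start, 0) :: pvPicksI 0 start else []) ++
      (if start < N - 1 then (N - 1 - start, N - 1) :: pvPicksI start (N - 1) else [])
    start :: (PySem.List.sorted2 keyed (fun t => -t.1) (fun t => t.2)).map (fun t => t.2)
  else []  -- Python raises ValueError here (excluded by Pre_)

-- ===== PRECONDITION & SPEC =====
-- Pre_ excludes exactly the inputs on which A raises ValueError (`start` outside [0, N-1]);
-- B raises the same error there.
def Pre_max_spread_permutation_pq (N : Int) (start : Int) : Prop := 0 ≤ start ∧ start < N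
instance (N : Int) (start : Int) : Decidable (Pre_max_spread_permutation_pq N start) := by
  unfold Pre_max_spread_permutation_pq; infer_instance

def pvWitness_max_spread_permutation_pq : Int × Int := (3, 1)

def Spec_max_spread_permutation_pq (N : Int) (start : Int) (out : List Int) : Prop :=
  out = max_spread_permutation_pq_alt N start
instance (N : Int) (start : Int) (out : List Int) : Decidable (Spec_max_spread_permutation_pq N start out) := by
  unfold Spec_max_spread_permutation_pq; infer_instance

-- ===== CLAIM (what is proved, stated in full; the proofs are below) =====
def Claim_equal_max_spread_permutation_pq : Prop :=
  ∀ (N : Int) (start : Int), Dom_max_spread_permutation_pq N start →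
    Pre_max_spread_permutation_pq N start →
    Spec_max_spread_permutation_pq N start (max_spread_permutation_pq N start)

-- ===== LEMMAS AND PROOFS =====

-- ---- regions: a maximal stretch of unpicked points between already-picked neighbours ----
inductive pvReg
  | L (b : Int)        -- points [0, b), right neighbour b
  | M (a b : Int)      -- points (a, b), both neighbours picked
  | R (a b : Int)      -- points (a, b], left neighbour a (b = N - 1)
  deriving DecidableEq, Repr

def pvRoot : pvReg → (Int × Int)
  | .L b => (b, 0)
  | .R a b => (b - a, b)
  | .M a b => (PySem.Int.floordiv (b - a) 2, a + PySem.Int.floordiv (b - a) 2)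

def pvRPicks : pvReg → List (Int × Int)
  | .L b => (b, 0) :: pvPicksI 0 b
  | .R a b => (b - a, b) :: pvPicksI a b
  | .M a b => pvPicksI a b

def pvChildren : pvReg → List pvReg
  | .L b => [.M 0 b]
  | .R a b => [.M a b]
  | .M a b => [.M a (a + PySem.Int.floordiv (b - a) 2), .M (a + PySem.Int.floordiv (b - a) 2) b]

def pvMem : pvReg → Int → Prop
  | .L b, i => 0 ≤ i ∧ i < b
  | .R a b, i => a < i ∧ i ≤ b
  | .M a b, i => a < i ∧ i < b

def pvDelta : pvReg → Int → Int
  | .L b, i => b - i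
  | .R a _, i => i - a
  | .M a b, i => min (i - a) (b - i)

def pvLo : pvReg → Int
  | .L _ => -1
  | .M a _ => a
  | .R a _ => a

def pvHi : pvReg → Int
  | .L b => b
  | .M _ b => b
  | .R _ b => b + 1

def pvOK (N : Int) : pvReg → Prop
  | .L b => 0 < b ∧ b ≤ N
  | .M a b => -1 ≤ a ∧ a ≤ b ∧ b ≤ N
  | .R a b => -1 ≤ a ∧ a < b ∧ b = N - 1

def pvSep (r r' : pvReg) : Prop := pvHi r ≤ pvLo r' ∨ pvHi r' ≤ pvLo r

def pvWF (N : Int) (RS : List pvReg) : Prop := RS.Pairwise pvSep ∧ ∀ r ∈ RS, pvOK N r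

def pvPKey (p : Int × Int) : Int ×ₗ Int := toLex (-p.1, p.2)

def pvValid (dist : PySem.Dict Int Int) (heap : List (Int × Int)) : Prop :=
  ∀ i v, dist.get? i = some v → (-v, i) ∈ heap

def pvStale (dist : PySem.Dict Int Int) (heap : List (Int × Int)) : Prop :=
  ∀ x ∈ heap, ∃ v, dist.get? x.2 = some v ∧ v ≤ -x.1

def pvDistOK (RS : List pvReg) (dist : PySem.Dict Int Int) : Prop :=
  (∀ r ∈ RS, ∀ j, pvMem r j → dist.get? j = some (pvDelta r j)) ∧
  (∀ j v, dist.get? j = some v → ∃ r ∈ RS, pvMem r j)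

-- ---- order basics ----
lemma pvLex_lt_iff (p q : Int × Int) : toLex p < toLex q ↔ p.1 < q.1 ∨ (p.1 = q.1 ∧ p.2 < q.2) := by
  exact Prod.Lex.toLex_lt_toLex

lemma pvKeyLt_iff (p q : Int × Int) : pvKeyLt p q = true ↔ toLex p < toLex q := by
  rw [pvLex_lt_iff]
  simp [pvKeyLt, Bool.or_eq_true, Bool.and_eq_true, decide_eq_true_iff, beq_iff_eq]

lemma pvPKey_lt_iff (p q : Int × Int) : pvPKey p < pvPKey q ↔ q.1 < p.1 ∨ (p.1 = q.1 ∧ p.2 < q.2) := by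
  unfold pvPKey
  rw [pvLex_lt_iff]
  constructor <;> (intro h; omega)

lemma pvPKey_le_iff (p q : Int × Int) : pvPKey p ≤ pvPKey q ↔ q.1 < p.1 ∨ (q.1 = p.1 ∧ p.2 ≤ q.2) := by
  rw [← not_lt, pvPKey_lt_iff]
  omega

lemma pvPKey_le_mk (x1 x2 y1 y2 : Int) :
    pvPKey (x1, x2) ≤ pvPKey (y1, y2) ↔ y1 < x1 ∨ (y1 = x1 ∧ x2 ≤ y2) := by
  simpa using pvPKey_le_iff (x1, x2) (y1, y2)

lemma pvPKey_inj {p q : Int × Int} (h : pvPKey p = pvPKey q) : p = q := by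
  have h1 := pvPKey_le_iff p q
  have h2 := pvPKey_le_iff q p
  rw [h] at h1
  rw [h] at h2
  simp at h1 h2
  have : p.1 = q.1 ∧ p.2 = q.2 := by omega
  exact Prod.ext this.1 this.2

-- ---- pvHeapMin ----
lemma pvHeapMin_mem (h : Int × Int) (t : List (Int × Int)) : pvHeapMin h t ∈ h :: t := by
  induction t generalizing h with
  | nil => simp [pvHeapMin]
  | cons y t ih =>
    have : pvHeapMin h (y :: t) = pvHeapMin (if pvKeyLt y h then y else h) t := by
      simp [pvHeapMin, List.foldl_cons]
    rw [this]
    have := ih (if pvKeyLt y h then y else h)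
    rcases List.mem_cons.1 this with h1 | h1
    · rw [h1]; split <;> simp
    · simp [h1]

lemma pvHeapMin_min (h : Int × Int) (t : List (Int × Int)) :
    ∀ x ∈ h :: t, toLex (pvHeapMin h t) ≤ toLex x := by
  induction t generalizing h with
  | nil => intro x hx; simp at hx; simp [pvHeapMin, hx]
  | cons y t ih =>
    intro x hx
    have hrw : pvHeapMin h (y :: t) = pvHeapMin (if pvKeyLt y h then y else h) t := by
      simp [pvHeapMin, List.foldl_cons]
    rw [hrw]
    have hmin := ih (if pvKeyLt y h then y else h)
    have hhd : toLex (pvHeapMin (if pvKeyLt y h then y else h) t) ≤ toLex (if pvKeyLt y h then y else h) :=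
      hmin _ (List.mem_cons_self ..)
    have hhy : toLex (if pvKeyLt y h then y else h) ≤ toLex y := by
      split
      · exact le_refl _
      · next hne =>
        have : ¬ toLex y < toLex h := fun hc => hne ((pvKeyLt_iff y h).2 hc)
        exact not_lt.1 this
    have hhh : toLex (if pvKeyLt y h then y else h) ≤ toLex h := by
      split
      · next hyes => exact le_of_lt ((pvKeyLt_iff y h).1 hyes)
      · exact le_refl _
    rcases List.mem_cons.1 hx with rfl | hx'
    · exact le_trans hhd hhh
    rcases List.mem_cons.1 hx' with rfl | hx''
    · exact le_trans hhd hhy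
    · exact hmin _ (List.mem_cons_of_mem _ hx'')

-- ---- dict helper lemmas (erase/get? at the items level; not provided by PySem) ----
lemma pvFind?_filter_ne (ps : List (Int × Int)) (k j : Int) :
    (ps.filter (fun p => !(p.1 == k))).find? (fun p => p.1 == j) =
      if j = k then none else ps.find? (fun p => p.1 == j) := by
  induction ps with
  | nil => simp
  | cons p ps ihp =>
    by_cases hpk : p.1 = k
    · rw [List.filter_cons_of_neg (by simp [hpk])]
      rw [ihp]
      by_cases hjk : j = k
      · simp [hjk]
      · rw [if_neg hjk, if_neg hjk, List.find?_cons_of_neg (by simp; omega)]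
    · rw [List.filter_cons_of_pos (by simp [hpk])]
      by_cases hpj : p.1 = j
      · rw [List.find?_cons_of_pos (by simp [hpj]), List.find?_cons_of_pos (by simp [hpj])]
        rw [if_neg (by omega)]
      · rw [List.find?_cons_of_neg (by simp [hpj]), List.find?_cons_of_neg (by simp [hpj]), ihp]

lemma pvGet?_erase (d : PySem.Dict Int Int) (k j : Int) :
    (d.erase k).get? j = if j = k then none else d.get? j := by
  obtain ⟨items⟩ := d
  simp only [PySem.Dict.erase, PySem.Dict.get?]
  rw [pvFind?_filter_ne]
  by_cases hjk : j = k
  · simp [hjk]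
  · simp [hjk]

lemma pvKeys_erase (d : PySem.Dict Int Int) (k : Int) :
    (d.erase k).keys = d.keys.filter (fun x => !(x == k)) := by
  obtain ⟨items⟩ := d
  simp only [PySem.Dict.erase, PySem.Dict.keys]
  induction items with
  | nil => simp
  | cons p ps ihp =>
    by_cases hpk : p.1 = k
    · rw [List.filter_cons_of_neg (by simp [hpk]), List.map_cons,
        List.filter_cons_of_neg (by simp [hpk])]
      exact ihp
    · rw [List.filter_cons_of_pos (by simp [hpk]), List.map_cons, List.map_cons,
        List.filter_cons_of_pos (by simp [hpk]), ihp]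

lemma pvMem_keys_iff (d : PySem.Dict Int Int) (k : Int) :
    k ∈ d.keys ↔ ∃ v, d.get? k = some v := by
  constructor
  · intro hmem
    cases hv : d.get? k with
    | none => rw [PySem.Dict.get?_eq_none_iff_not_mem_keys] at hv; exact absurd hmem hv
    | some v => exact ⟨v, rfl⟩
  · rintro ⟨v, hv⟩
    by_contra hn
    rw [← PySem.Dict.get?_eq_none_iff_not_mem_keys] at hn
    rw [hn] at hv
    cases hv

lemma pvGet?_of_items_map (l : List Int) (f : Int → Int) (j : Int) :
    (PySem.Dict.mk (l.map (fun i => (i, f i)))).get? j =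
      if j ∈ l then some (f j) else none := by
  induction l with
  | nil => simp [PySem.Dict.get?]
  | cons a l ih =>
    rw [List.map_cons, PySem.Dict.get?_mk_cons]
    by_cases haj : a = j
    · subst haj
      simp
    · rw [if_neg (by simpa using haj), ih]
      by_cases hjl : j ∈ l
      · simp [hjl, haj]
      · have hja : ¬ j = a := fun h => haj h.symm
        simp [hjl, hja]

-- ---- pop loop ----
lemma pvPopLoop_spec (fuel : Nat) (dist : PySem.Dict Int Int) (heap : List (Int × Int)) (c v : Int)
    (hfuel : heap.length ≤ fuel) (hnd : heap.Nodup)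
    (hstale : pvStale dist heap) (hvalid : pvValid dist heap)
    (hc : dist.get? c = some v)
    (hmin : ∀ j w, dist.get? j = some w → toLex ((-v : Int), c) ≤ toLex (-w, j)) :
    pvPopLoop fuel dist heap = some ((c, v), heap.filter (fun x => pvKeyLt (-v, c) x)) := by
  induction fuel generalizing heap with
  | zero =>
    have hmem := hvalid c v hc
    have := List.length_pos_of_mem hmem
    omega
  | succ fuel ih =>
    have hmemvc := hvalid c v hc
    cases heap with
    | nil => exact absurd hmemvc (by simp)
    | cons h t =>
      have hmmem : pvHeapMin h t ∈ h :: t := pvHeapMin_mem h t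
      have hmmin : ∀ x ∈ h :: t, toLex (pvHeapMin h t) ≤ toLex x := pvHeapMin_min h t
      obtain ⟨wm, hwm, hwmle⟩ := hstale _ hmmem
      have hgetD : PySem.Dict.getD dist (pvHeapMin h t).2 (-1) = wm :=
        PySem.Dict.getD_of_get?_eq_some _ _ hwm
      by_cases hvm : wm = -(pvHeapMin h t).1
      · -- the minimum is a live entry: it must be (-v, c)
        have hlive : ((-wm : Int), (pvHeapMin h t).2) = pvHeapMin h t := by
          have h1 : (-wm : Int) = (pvHeapMin h t).1 := by omega
          rw [h1]
        have h1 := hmin _ _ hwm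
        have h2 := hmmin _ hmemvc
        have hme : pvHeapMin h t = (-v, c) := by
          have h1' : toLex ((-v : Int), c) ≤ toLex (pvHeapMin h t) := by
            rw [← hlive]; exact h1
          exact toLex.injective (le_antisymm h2 h1')
        have hwmv : wm = v := by
          rw [hme] at hwm
          simp only at hwm
          rw [hc] at hwm
          exact (Option.some_inj.1 hwm).symm
        have hcondT : (PySem.Dict.getD dist (pvHeapMin h t).2 (-1) == -(pvHeapMin h t).1) = true := by
          rw [hgetD]
          simp [hvm]
        have hfc : ((h :: t).erase (pvHeapMin h t)) =
            (h :: t).filter (fun x => pvKeyLt (-v, c) x) := by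
          rw [List.Nodup.erase_eq_filter hnd]
          apply List.filter_congr
          intro x hx
          by_cases hxm : x = pvHeapMin h t
          · subst hxm
            have hPm : pvKeyLt ((-v : Int), c) (pvHeapMin h t) = false := by
              cases hb : pvKeyLt ((-v : Int), c) (pvHeapMin h t)
              · rfl
              · exact absurd (lt_of_lt_of_le ((pvKeyLt_iff _ _).1 hb) (hmmin _ hmemvc)) (lt_irrefl _)
            simp [hPm]
          · have hle : toLex ((-v : Int), c) ≤ toLex x := by
              rw [← hme]
              exact hmmin x hx
            have hne : toLex ((-v : Int), c) ≠ toLex x := by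
              intro hcon
              exact hxm (by rw [hme]; exact (toLex.injective hcon).symm)
            have hlt : toLex ((-v : Int), c) < toLex x := lt_of_le_of_ne hle hne
            simp [hxm, (pvKeyLt_iff _ _).2 hlt]
        simp only [pvPopLoop, hcondT, if_true]
        rw [hfc, hme]
        simp
      · -- stale entry: skipped and removed
        have hcond : (PySem.Dict.getD dist (pvHeapMin h t).2 (-1) == -(pvHeapMin h t).1) = false := by
          rw [hgetD]
          simp [hvm]
        simp only [pvPopLoop, hcond, Bool.false_eq_true, if_false]
        have hsub : ∀ x ∈ (h :: t).erase (pvHeapMin h t), x ∈ h :: t :=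
          fun x hx => List.mem_of_mem_erase hx
        have hres := ih ((h :: t).erase (pvHeapMin h t))
          (by
            have := List.length_erase_of_mem hmmem
            simp only [this]
            simp at hfuel ⊢
            omega)
          (hnd.erase _)
          (fun x hx => hstale x (hsub x hx))
          (fun i vv hivv => by
            have hmemx := hvalid i vv hivv
            have hne : ((-vv : Int), i) ≠ pvHeapMin h t := by
              intro hcon
              rw [← hcon] at hwm
              simp only at hwm
              rw [hivv] at hwm
              have := Option.some_inj.1 hwm
              rw [← hcon] at hvm
              simp only at hvm
              omega
            exact (List.mem_erase_of_ne hne).2 hmemx)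
        rw [hres]
        have hPm : pvKeyLt ((-v : Int), c) (pvHeapMin h t) = false := by
          cases hb : pvKeyLt ((-v : Int), c) (pvHeapMin h t)
          · rfl
          · exfalso
            have hlt := (pvKeyLt_iff _ _).1 hb
            exact absurd (lt_of_lt_of_le hlt (hmmin _ hmemvc)) (lt_irrefl _)
        have hff : ((h :: t).erase (pvHeapMin h t)).filter (fun x => pvKeyLt (-v, c) x) =
            (h :: t).filter (fun x => pvKeyLt (-v, c) x) := by
          rw [List.Nodup.erase_eq_filter hnd, List.filter_filter]
          apply List.filter_congr
          intro x hx
          by_cases hxm : x = pvHeapMin h t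
          · subst hxm
            simp [hPm]
          · simp [hxm]
        rw [hff]

-- ---- update fold ----
lemma pvUpd_spec (c : Int) (ks : List Int) (d : PySem.Dict Int Int) (h : List (Int × Int))
    (hks : ks.Nodup) (hkeys : ∀ k ∈ ks, ∃ w, d.get? k = some w)
    (hnd : h.Nodup) (hstale : ∀ x ∈ h, ∃ w, d.get? x.2 = some w ∧ w ≤ -x.1) :
    (∀ j w, d.get? j = some w →
      (ks.foldl (pvUpdStep c) (d, h)).1.get? j = some (if j ∈ ks then min w |j - c| else w)) ∧
    (∀ j, d.get? j = none → (ks.foldl (pvUpdStep c) (d, h)).1.get? j = none) ∧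
    (ks.foldl (pvUpdStep c) (d, h)).1.keys = d.keys ∧
    (∀ x ∈ h, x ∈ (ks.foldl (pvUpdStep c) (d, h)).2) ∧
    (∀ j ∈ ks, ∀ w, d.get? j = some w → |j - c| < w →
      ((-(|j - c|), j) : Int × Int) ∈ (ks.foldl (pvUpdStep c) (d, h)).2) ∧
    (∀ x ∈ (ks.foldl (pvUpdStep c) (d, h)).2,
      ∃ w, (ks.foldl (pvUpdStep c) (d, h)).1.get? x.2 = some w ∧ w ≤ -x.1) ∧
    (ks.foldl (pvUpdStep c) (d, h)).2.Nodup := by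
  induction ks generalizing d h with
  | nil =>
    refine ⟨?_, fun j hw => hw, rfl, fun x hx => hx, ?_, hstale, hnd⟩
    · intro j w hw
      simpa using hw
    · intro j hj
      simp at hj
  | cons k ks ih =>
    have hkk : k ∉ ks := (List.nodup_cons.1 hks).1
    have hks' : ks.Nodup := (List.nodup_cons.1 hks).2
    obtain ⟨wk, hwk⟩ := hkeys k (by simp)
    have hstep : pvUpdStep c (d, h) k =
        if |k - c| < wk then (d.insert k |k - c|, h ++ [((-(|k - c|) : Int), k)]) else (d, h) := by
      simp only [pvUpdStep, hwk]
    rw [List.foldl_cons, hstep]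
    by_cases hlt : |k - c| < wk
    · rw [if_pos hlt]
      have hget' : ∀ j, (d.insert k |k - c|).get? j = if j = k then some |k - c| else d.get? j :=
        fun j => PySem.Dict.get?_insert d k j _
      have hcontains : d.contains k = true := by
        have hmem : k ∈ d.keys := by
          by_contra hn
          rw [← PySem.Dict.get?_eq_none_iff_not_mem_keys] at hn
          rw [hn] at hwk
          cases hwk
        rw [PySem.Dict.contains_eq_decide_mem_keys]
        simpa using hmem
      have hkeys' : ∀ k' ∈ ks, ∃ w, (d.insert k |k - c|).get? k' = some w := by
        intro k' hk'
        rw [hget']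
        by_cases he : k' = k
        · exact ⟨_, by rw [if_pos he]⟩
        · rw [if_neg he]
          exact hkeys k' (by simp [hk'])
      have hpushnew : ((-(|k - c|) : Int), k) ∉ h := by
        intro hmem
        obtain ⟨w', hw', hwle'⟩ := hstale _ hmem
        have h2 : (some w' : Option Int) = some wk := by rw [← hw', ← hwk]
        have h3 := Option.some_inj.1 h2
        omega
      have hdisj : h.Disjoint [((-(|k - c|) : Int), k)] := by
        intro x hx1 hx2
        have hx2' : x = ((-(|k - c|) : Int), k) := by simpa using hx2
        exact hpushnew (hx2' ▸ hx1)
      have hnd' : (h ++ [((-(|k - c|) : Int), k)]).Nodup :=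
        List.Nodup.append hnd (List.nodup_singleton _) hdisj
      have hstale' : ∀ x ∈ h ++ [((-(|k - c|) : Int), k)],
          ∃ w, (d.insert k |k - c|).get? x.2 = some w ∧ w ≤ -x.1 := by
        intro x hx
        rcases List.mem_append.1 hx with hx1 | hx2
        · obtain ⟨w', hw', hle'⟩ := hstale _ hx1
          rw [hget']
          by_cases he : x.2 = k
          · refine ⟨|k - c|, by rw [if_pos he], ?_⟩
            rw [he] at hw'
            have h2 : (some w' : Option Int) = some wk := by rw [← hw', ← hwk]
            have h3 := Option.some_inj.1 h2
            omega
          · exact ⟨w', by rw [if_neg he]; exact hw', hle'⟩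
        · have hx2' : x = ((-(|k - c|) : Int), k) := by simpa using hx2
          subst hx2'
          refine ⟨|k - c|, ?_, by simp⟩
          rw [hget']
          simp
      obtain ⟨ih1, ih2, ih3, ih4, ih5, ih6, ih7⟩ :=
        ih (d.insert k |k - c|) (h ++ [((-(|k - c|) : Int), k)]) hks' hkeys' hnd' hstale'
      refine ⟨?_, ?_, ?_, ?_, ?_, ih6, ih7⟩
      · intro j w hw
        by_cases he : j = k
        · subst he
          have hwwk : wk = w := Option.some_inj.1 (hwk.symm.trans hw)
          have hj' : (d.insert j |j - c|).get? j = some |j - c| := by rw [hget']; simp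
          have hres := ih1 j _ hj'
          have hres2 : (ks.foldl (pvUpdStep c)
              (d.insert j |j - c|, h ++ [((-(|j - c|) : Int), j)])).1.get? j = some |j - c| := by
            rw [hres, if_neg hkk]
          have hcond : (if j ∈ j :: ks then min w |j - c| else w) = |j - c| := by
            simp only [List.mem_cons, true_or, if_true]
            omega
          rw [hcond]
          exact hres2
        · have hj' : (d.insert k |k - c|).get? j = some w := by
            rw [hget', if_neg he]
            exact hw
          have hres := ih1 j w hj'
          simpa [List.mem_cons, he] using hres
      · intro j hw
        have he : j ≠ k := by
          intro hcon
          rw [hcon, hwk] at hw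
          cases hw
        have hj' : (d.insert k |k - c|).get? j = none := by
          rw [hget', if_neg he]
          exact hw
        exact ih2 j hj'
      · rw [ih3]
        exact PySem.Dict.keys_insert_of_contains d _ hcontains
      · intro x hx
        exact ih4 x (List.mem_append_left _ hx)
      · intro j hj w hw hlt2
        rcases List.mem_cons.1 hj with rfl | hj'
        · exact ih4 _ (List.mem_append_right _ (by simp))
        · have he : j ≠ k := fun hcon => hkk (hcon ▸ hj')
          have hj2 : (d.insert k |k - c|).get? j = some w := by
            rw [hget', if_neg he]
            exact hw
          exact ih5 j hj' w hj2 hlt2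
    · rw [if_neg hlt]
      obtain ⟨ih1, ih2, ih3, ih4, ih5, ih6, ih7⟩ :=
        ih d h hks' (fun k' hk' => hkeys k' (by simp [hk'])) hnd hstale
      refine ⟨?_, ih2, ih3, ih4, ?_, ih6, ih7⟩
      · intro j w hw
        by_cases he : j = k
        · subst he
          have hwwk : wk = w := Option.some_inj.1 (hwk.symm.trans hw)
          have hres := ih1 j w hw
          have hres2 : (ks.foldl (pvUpdStep c) (d, h)).1.get? j = some w := by
            rw [hres, if_neg hkk]
          have hcond : (if j ∈ j :: ks then min w |j - c| else w) = w := by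
            simp only [List.mem_cons, true_or, if_true]
            omega
          rw [hcond]
          exact hres2
        · have hres := ih1 j w hw
          simpa [List.mem_cons, he] using hres
      · intro j hj w hw hlt2
        rcases List.mem_cons.1 hj with rfl | hj'
        · have hwwk : wk = w := Option.some_inj.1 (hwk.symm.trans hw)
          omega
        · exact ih5 j hj' w hw hlt2

-- ---- picks lemmas ----
lemma pvFdiv2 (x : Int) : PySem.Int.floordiv x 2 = x / 2 :=
  PySem.Int.floordiv_eq_ediv_of_pos (by norm_num)

lemma pvPicksI_key (a b : Int) : ∀ p ∈ pvPicksI a b,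
    a < p.2 ∧ p.2 < b ∧ 1 ≤ p.1 ∧
    (p.1 < PySem.Int.floordiv (b - a) 2 ∨
      (p.1 = PySem.Int.floordiv (b - a) 2 ∧ a + PySem.Int.floordiv (b - a) 2 ≤ p.2)) := by
  induction a, b using pvPicksI.induct with
  | case1 a b h =>
    rw [pvPicksI, if_pos h]
    simp
  | case2 a b h ih1 ih2 =>
    rw [pvPicksI, if_neg h]
    intro p hp
    simp only [List.mem_cons, List.mem_append] at hp
    rcases hp with rfl | hl | hr
    · refine ⟨?_, ?_, ?_, Or.inr ⟨rfl, le_refl _⟩⟩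
      · show a < a + PySem.Int.floordiv (b - a) 2
        rw [pvFdiv2]
        omega
      · show a + PySem.Int.floordiv (b - a) 2 < b
        rw [pvFdiv2]
        omega
      · show (1 : Int) ≤ PySem.Int.floordiv (b - a) 2
        rw [pvFdiv2]
        omega
    · obtain ⟨h1, h2, h3, h4⟩ := ih1 p hl
      simp only [pvFdiv2] at *
      omega
    · obtain ⟨h1, h2, h3, h4⟩ := ih2 p hr
      simp only [pvFdiv2] at *
      omega

lemma pvPicksI_mem_iff (a b j : Int) : (j ∈ (pvPicksI a b).map (·.2)) ↔ a < j ∧ j < b := by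
  induction a, b using pvPicksI.induct with
  | case1 a b h =>
    rw [pvPicksI, if_pos h]
    simp
    omega
  | case2 a b h ih1 ih2 =>
    rw [pvPicksI, if_neg h]
    simp only [List.map_cons, List.map_append, List.mem_cons, List.mem_append, ih1, ih2]
    simp only [pvFdiv2] at *
    omega

lemma pvPicksI_snd_nodup (a b : Int) : ((pvPicksI a b).map (·.2)).Nodup := by
  induction a, b using pvPicksI.induct with
  | case1 a b h =>
    rw [pvPicksI, if_pos h]
    simp
  | case2 a b h ih1 ih2 =>
    rw [pvPicksI, if_neg h]
    simp only [List.map_cons, List.map_append, List.nodup_cons, List.mem_append]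
    refine ⟨?_, List.Nodup.append ih1 ih2 ?_⟩
    · rw [pvPicksI_mem_iff, pvPicksI_mem_iff]
      simp only [pvFdiv2] at *
      omega
    · intro x hx1 hx2
      rw [pvPicksI_mem_iff] at hx1 hx2
      omega

-- ---- region lemmas ----
lemma pvRPicks_eq (r : pvReg) (hne : pvRPicks r ≠ []) :
    pvRPicks r = pvRoot r :: (pvChildren r).flatMap pvRPicks := by
  cases r with
  | L b => simp [pvRPicks, pvRoot, pvChildren]
  | R a b => simp [pvRPicks, pvRoot, pvChildren]
  | M a b =>
    simp only [pvRPicks, pvRoot, pvChildren] at *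
    rw [pvPicksI] at hne
    by_cases h : b - a < 2
    · rw [if_pos h] at hne; exact absurd rfl hne
    · rw [pvPicksI, if_neg h]
      simp [pvRPicks]

lemma pvRoot_min (r : pvReg) : ∀ p ∈ pvRPicks r, p = pvRoot r ∨ pvPKey (pvRoot r) < pvPKey p := by
  rintro ⟨p1, p2⟩ hp
  by_cases hroot : (p1, p2) = pvRoot r
  · exact Or.inl hroot
  right
  rw [pvPKey_lt_iff]
  cases r with
  | L b =>
    simp only [pvRPicks, List.mem_cons] at hp
    rcases hp with heq | hp'
    · exact absurd heq hroot
    · obtain ⟨h1, h2, h3, h4⟩ := pvPicksI_key 0 b _ hp'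
      simp only [pvRoot]
      simp only [pvFdiv2] at h4
      dsimp only at h1 h2 h3 h4
      omega
  | R a b =>
    simp only [pvRPicks, List.mem_cons] at hp
    rcases hp with heq | hp'
    · exact absurd heq hroot
    · obtain ⟨h1, h2, h3, h4⟩ := pvPicksI_key a b _ hp'
      simp only [pvRoot]
      simp only [pvFdiv2] at h4
      dsimp only at h1 h2 h3 h4
      omega
  | M a b =>
    simp only [pvRPicks] at hp
    obtain ⟨h1, h2, h3, h4⟩ := pvPicksI_key a b _ hp
    simp only [pvRoot, Prod.mk.injEq, not_and, pvFdiv2] at hroot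
    simp only [pvRoot]
    simp only [pvFdiv2] at h4 ⊢
    dsimp only at h1 h2 h3 h4
    omega

lemma pvRoot_mem (N : Int) (r : pvReg) (hOK : pvOK N r) (hne : pvRPicks r ≠ []) :
    pvMem r (pvRoot r).2 := by
  cases r with
  | L b => simp only [pvOK, pvRoot, pvMem] at *; omega
  | R a b => simp only [pvOK, pvRoot, pvMem] at *; omega
  | M a b =>
    simp only [pvOK, pvRoot, pvMem, pvRPicks] at *
    rw [pvPicksI] at hne
    by_cases h : b - a < 2
    · rw [if_pos h] at hne; exact absurd rfl hne
    · simp only [pvFdiv2]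
      omega

lemma pvRoot_delta (r : pvReg) : pvDelta r (pvRoot r).2 = (pvRoot r).1 := by
  cases r with
  | L b => simp [pvDelta, pvRoot]
  | R a b => simp [pvDelta, pvRoot]
  | M a b =>
    simp only [pvDelta, pvRoot, pvFdiv2]
    omega

lemma pvMem_key_le (r : pvReg) (j : Int) (h : pvMem r j) :
    pvPKey (pvRoot r) ≤ pvPKey (pvDelta r j, j) := by
  cases r with
  | L b =>
    simp only [pvMem] at h
    simp only [pvRoot, pvDelta]
    rw [pvPKey_le_mk]
    omega
  | R a b =>
    simp only [pvMem] at h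
    simp only [pvRoot, pvDelta]
    rw [pvPKey_le_mk]
    omega
  | M a b =>
    simp only [pvMem] at h
    simp only [pvRoot, pvDelta, pvFdiv2]
    rw [pvPKey_le_mk]
    omega

lemma pvMem_bounds (r : pvReg) (j : Int) (h : pvMem r j) : pvLo r < j ∧ j < pvHi r := by
  cases r <;> (simp only [pvMem, pvLo, pvHi] at *; omega)

lemma pvSep_disjoint (r r' : pvReg) (j : Int) (hsep : pvSep r r')
    (h1 : pvMem r j) (h2 : pvMem r' j) : False := by
  obtain ⟨hb1, hb2⟩ := pvMem_bounds r j h1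
  obtain ⟨hb3, hb4⟩ := pvMem_bounds r' j h2
  rcases hsep with hs | hs <;> omega

lemma pvMem_rpicks (N : Int) (r : pvReg) (hOK : pvOK N r) (j : Int) :
    pvMem r j ↔ j ∈ (pvRPicks r).map (·.2) := by
  cases r with
  | L b =>
    simp only [pvOK] at hOK
    simp only [pvMem, pvRPicks, List.map_cons, List.mem_cons, pvPicksI_mem_iff]
    omega
  | R a b =>
    simp only [pvOK] at hOK
    simp only [pvMem, pvRPicks, List.map_cons, List.mem_cons, pvPicksI_mem_iff]
    omega
  | M a b =>
    simp only [pvMem, pvRPicks, pvPicksI_mem_iff]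

lemma pvRPicks_snd_nodup (r : pvReg) : ((pvRPicks r).map (·.2)).Nodup := by
  cases r with
  | L b =>
    simp only [pvRPicks, List.map_cons, List.nodup_cons, pvPicksI_mem_iff]
    exact ⟨by omega, pvPicksI_snd_nodup 0 b⟩
  | R a b =>
    simp only [pvRPicks, List.map_cons, List.nodup_cons, pvPicksI_mem_iff]
    exact ⟨by omega, pvPicksI_snd_nodup a b⟩
  | M a b => exact pvPicksI_snd_nodup a b

lemma pvChildren_ok (N : Int) (r : pvReg) (hOK : pvOK N r) :
    ∀ c ∈ pvChildren r, pvOK N c := by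
  intro c hc
  cases r with
  | L b =>
    simp only [pvChildren, List.mem_singleton] at hc
    subst hc
    simp only [pvOK] at *
    omega
  | R a b =>
    simp only [pvChildren, List.mem_singleton] at hc
    subst hc
    simp only [pvOK] at *
    omega
  | M a b =>
    simp only [pvChildren, List.mem_cons, List.mem_singleton] at hc
    rcases hc with rfl | rfl | h
    · simp only [pvOK, pvFdiv2] at *; omega
    · simp only [pvOK, pvFdiv2] at *; omega
    · exact absurd h (List.not_mem_nil)

lemma pvChildren_bounds (N : Int) (r : pvReg) (hOK : pvOK N r) :
    ∀ c ∈ pvChildren r, pvLo r ≤ pvLo c ∧ pvHi c ≤ pvHi r := by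
  intro c hc
  cases r with
  | L b =>
    simp only [pvChildren, List.mem_singleton] at hc
    subst hc
    simp only [pvOK, pvLo, pvHi] at *
    omega
  | R a b =>
    simp only [pvChildren, List.mem_singleton] at hc
    subst hc
    simp only [pvOK, pvLo, pvHi] at *
    omega
  | M a b =>
    simp only [pvChildren, List.mem_cons, List.mem_singleton] at hc
    rcases hc with rfl | rfl | h
    · simp only [pvOK, pvLo, pvHi, pvFdiv2] at *; omega
    · simp only [pvOK, pvLo, pvHi, pvFdiv2] at *; omega
    · exact absurd h (List.not_mem_nil)

lemma pvChildren_sep (r : pvReg) : (pvChildren r).Pairwise pvSep := by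
  cases r with
  | L b => simp [pvChildren]
  | R a b => simp [pvChildren]
  | M a b =>
    simp only [pvChildren]
    refine List.Pairwise.cons ?_ (by simp)
    intro c hc
    simp only [List.mem_singleton] at hc
    subst hc
    simp only [pvSep, pvLo, pvHi]
    omega

lemma pvChild_mem_parent (r c : pvReg) (j : Int) (hc : c ∈ pvChildren r) (h : pvMem c j) :
    pvMem r j ∧ j ≠ (pvRoot r).2 := by
  cases r with
  | L b =>
    simp only [pvChildren, List.mem_singleton] at hc
    subst hc
    simp only [pvMem, pvRoot] at *
    omega
  | R a b =>
    simp only [pvChildren, List.mem_singleton] at hc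
    subst hc
    simp only [pvMem, pvRoot] at *
    omega
  | M a b =>
    simp only [pvChildren, List.mem_cons, List.mem_singleton] at hc
    rcases hc with rfl | rfl | hn
    · simp only [pvMem, pvRoot, pvFdiv2] at *; omega
    · simp only [pvMem, pvRoot, pvFdiv2] at *; omega
    · exact absurd hn (List.not_mem_nil)

lemma pvSplit_mem (r : pvReg) (j : Int) (h : pvMem r j) (hj : j ≠ (pvRoot r).2) :
    ∃ c ∈ pvChildren r, pvMem c j := by
  cases r with
  | L b =>
    refine ⟨.M 0 b, by simp [pvChildren], ?_⟩
    simp only [pvMem, pvRoot] at *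
    omega
  | R a b =>
    refine ⟨.M a b, by simp [pvChildren], ?_⟩
    simp only [pvMem, pvRoot] at *
    omega
  | M a b =>
    simp only [pvMem, pvRoot, pvFdiv2] at *
    by_cases hside : j < a + (b - a) / 2
    · refine ⟨.M a (a + PySem.Int.floordiv (b - a) 2), by simp [pvChildren], ?_⟩
      simp only [pvMem, pvFdiv2]
      omega
    · refine ⟨.M (a + PySem.Int.floordiv (b - a) 2) b, by simp [pvChildren], ?_⟩
      simp only [pvMem, pvFdiv2]
      omega

lemma pvChild_delta (r c : pvReg) (j : Int) (hc : c ∈ pvChildren r) (h : pvMem c j) :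
    min (pvDelta r j) |j - (pvRoot r).2| = pvDelta c j := by
  cases r with
  | L b =>
    simp only [pvChildren, List.mem_singleton] at hc
    subst hc
    simp only [pvMem, pvRoot, pvDelta] at *
    rcases abs_cases (j - 0) with ⟨he, _⟩ | ⟨he, _⟩ <;> (rw [he]; omega)
  | R a b =>
    simp only [pvChildren, List.mem_singleton] at hc
    subst hc
    simp only [pvMem, pvRoot, pvDelta] at *
    rcases abs_cases (j - b) with ⟨he, _⟩ | ⟨he, _⟩ <;> (rw [he]; omega)
  | M a b =>
    simp only [pvChildren, List.mem_cons, List.mem_singleton] at hc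
    rcases hc with rfl | rfl | hn
    · simp only [pvMem, pvRoot, pvDelta, pvFdiv2] at *
      rcases abs_cases (j - (a + (b - a) / 2)) with ⟨he, _⟩ | ⟨he, _⟩ <;> (rw [he]; omega)
    · simp only [pvMem, pvRoot, pvDelta, pvFdiv2] at *
      rcases abs_cases (j - (a + (b - a) / 2)) with ⟨he, _⟩ | ⟨he, _⟩ <;> (rw [he]; omega)
    · exact absurd hn (List.not_mem_nil)

lemma pvOK_bounds (N : Int) (r : pvReg) (h : pvOK N r) : -1 ≤ pvLo r ∧ pvHi r ≤ N := by
  cases r <;> (simp only [pvOK, pvLo, pvHi] at *; omega)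

lemma pvSep_delta (N : Int) (r r' : pvReg) (j c : Int) (hsep : pvSep r r')
    (hOK : pvOK N r) (hOK' : pvOK N r') (hj : pvMem r j) (hc : pvMem r' c) :
    pvDelta r j ≤ |j - c| := by
  obtain ⟨hb1, hb2⟩ := pvMem_bounds r j hj
  obtain ⟨hb3, hb4⟩ := pvMem_bounds r' c hc
  obtain ⟨hk1, hk2⟩ := pvOK_bounds N r hOK
  obtain ⟨hk3, hk4⟩ := pvOK_bounds N r' hOK'
  have hA : j - c ≤ |j - c| := le_abs_self _
  have hB : -(j - c) ≤ |j - c| := neg_le_abs _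
  rcases hsep with hs | hs
  · cases r with
    | L b => simp only [pvMem, pvDelta, pvLo, pvHi, pvOK] at *; omega
    | M a b =>
      simp only [pvMem, pvDelta, pvLo, pvHi, pvOK] at *
      exact le_trans (min_le_right _ _) (by omega)
    | R a b => simp only [pvMem, pvDelta, pvLo, pvHi, pvOK] at *; omega
  · cases r with
    | L b => simp only [pvMem, pvDelta, pvLo, pvHi, pvOK] at *; omega
    | M a b =>
      simp only [pvMem, pvDelta, pvLo, pvHi, pvOK] at *
      exact le_trans (min_le_left _ _) (by omega)
    | R a b => simp only [pvMem, pvDelta, pvLo, pvHi, pvOK] at *; omega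

lemma pvSep_mono (r c y : pvReg) (h : pvSep r y) (h1 : pvLo r ≤ pvLo c) (h2 : pvHi c ≤ pvHi r) :
    pvSep c y := by
  unfold pvSep at *
  omega

lemma pvSep_symm (r y : pvReg) (h : pvSep r y) : pvSep y r := by
  unfold pvSep at *
  tauto

lemma pvWF_split (N : Int) (RS₁ RS₂ : List pvReg) (r : pvReg)
    (h : pvWF N (RS₁ ++ r :: RS₂)) : pvWF N (RS₁ ++ (pvChildren r ++ RS₂)) := by
  obtain ⟨hpw, hok⟩ := h
  rw [List.pairwise_append] at hpw
  obtain ⟨hpw1, hpw2, hcross⟩ := hpw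
  rw [List.pairwise_cons] at hpw2
  obtain ⟨hr2, hpw3⟩ := hpw2
  have hOKr : pvOK N r := hok r (by simp)
  have hbnd := pvChildren_bounds N r hOKr
  constructor
  · rw [List.pairwise_append]
    refine ⟨hpw1, ?_, ?_⟩
    · rw [List.pairwise_append]
      refine ⟨pvChildren_sep r, hpw3, ?_⟩
      intro c hc y hy
      exact pvSep_mono r c y (hr2 y hy) (hbnd c hc).1 (hbnd c hc).2
    · intro x hx y hy
      rcases List.mem_append.1 hy with hy1 | hy2
      · have hxr : pvSep x r := hcross x hx r (by simp)
        exact pvSep_symm _ _ (pvSep_mono r y x (pvSep_symm _ _ hxr) (hbnd y hy1).1 (hbnd y hy1).2)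
      · exact hcross x hx y (by simp [hy2])
  · intro x hx
    rcases List.mem_append.1 hx with hx1 | hx2
    · exact hok x (by simp [hx1])
    rcases List.mem_append.1 hx2 with hx3 | hx4
    · exact pvChildren_ok N r hOKr x hx3
    · exact hok x (by simp [hx4])

-- ---- master induction ----
lemma pvMaster (N : Int) (fuel : Nat) (RS : List pvReg) (dist : PySem.Dict Int Int)
    (heap : List (Int × Int)) (chosen : List Int) (rest : List (Int × Int))
    (hWF : pvWF N RS) (hD : pvDistOK RS dist) (hkn : dist.keys.Nodup)
    (hV : pvValid dist heap) (hS : pvStale dist heap) (hhn : heap.Nodup)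
    (hperm : rest.Perm (RS.flatMap pvRPicks))
    (hsort : rest.Pairwise (fun p q => pvPKey p < pvPKey q))
    (hfuel : rest.length ≤ fuel) :
    pvLoopA fuel dist heap chosen = chosen ++ rest.map (fun t => t.2) := by
  induction rest generalizing RS dist heap chosen fuel with
  | nil =>
    have hnomem : ∀ j v, dist.get? j = some v → False := by
      intro j v hj
      obtain ⟨r, hr, hmem⟩ := hD.2 j v hj
      have hjp : j ∈ (pvRPicks r).map (·.2) := (pvMem_rpicks N r (hWF.2 r hr) j).1 hmem
      obtain ⟨p, hp, hpj⟩ := List.mem_map.1 hjp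
      have hpf : p ∈ RS.flatMap pvRPicks := List.mem_flatMap.2 ⟨r, hr, hp⟩
      have := hperm.mem_iff.2 hpf
      simp at this
    have hheap : heap = [] := by
      cases heap with
      | nil => rfl
      | cons x t =>
        obtain ⟨v, hv, _⟩ := hS x (List.mem_cons_self ..)
        exact absurd hv (fun h => hnomem _ _ h)
    subst hheap
    cases fuel <;> simp [pvLoopA]
  | cons hd rest' ih =>
    have hhdmem : hd ∈ RS.flatMap pvRPicks := hperm.mem_iff.1 (List.mem_cons_self ..)
    obtain ⟨r, hr, hp⟩ := List.mem_flatMap.1 hhdmem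
    obtain ⟨RS₁, RS₂, hRS⟩ := List.append_of_mem hr
    have hOKr : pvOK N r := hWF.2 r hr
    have hne : pvRPicks r ≠ [] := List.ne_nil_of_mem hp
    have hhd : hd = pvRoot r := by
      rcases pvRoot_min r hd hp with h | hlt
      · exact h
      · exfalso
        have hrootmem : pvRoot r ∈ RS.flatMap pvRPicks :=
          List.mem_flatMap.2 ⟨r, hr, by rw [pvRPicks_eq r hne]; exact List.mem_cons_self ..⟩
        have hro : pvRoot r ∈ hd :: rest' := hperm.mem_iff.2 hrootmem
        rcases List.mem_cons.1 hro with he | hin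
        · rw [← he] at hlt
          exact absurd hlt (lt_irrefl _)
        · have hlt2 := (List.pairwise_cons.1 hsort).1 _ hin
          exact absurd (lt_trans hlt2 hlt) (lt_irrefl _)
    have hrootm : pvMem r (pvRoot r).2 := pvRoot_mem N r hOKr hne
    have hdist_hd : dist.get? (pvRoot r).2 = some (pvRoot r).1 := by
      have h1 := hD.1 r hr _ hrootm
      rw [pvRoot_delta] at h1
      exact h1
    have hsel : ∀ j w, dist.get? j = some w →
        toLex ((-(pvRoot r).1 : Int), (pvRoot r).2) ≤ toLex (-w, j) := by
      intro j w hjw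
      obtain ⟨r', hr', hmem'⟩ := hD.2 j w hjw
      have hδ : dist.get? j = some (pvDelta r' j) := hD.1 r' hr' j hmem'
      have hw : w = pvDelta r' j := by
        rw [hjw] at hδ
        exact Option.some_inj.1 hδ
      have hne' : pvRPicks r' ≠ [] := by
        intro hcon
        have hjp := (pvMem_rpicks N r' (hWF.2 r' hr') j).1 hmem'
        rw [hcon] at hjp
        simp at hjp
      have hroot' : pvRoot r' ∈ hd :: rest' := hperm.mem_iff.2
        (List.mem_flatMap.2 ⟨r', hr', by rw [pvRPicks_eq r' hne']; exact List.mem_cons_self ..⟩)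
      have hle1 : pvPKey hd ≤ pvPKey (pvRoot r') := by
        rcases List.mem_cons.1 hroot' with he | hin
        · exact le_of_eq (congrArg pvPKey he.symm)
        · exact le_of_lt ((List.pairwise_cons.1 hsort).1 _ hin)
      have hle2 : pvPKey (pvRoot r') ≤ pvPKey (pvDelta r' j, j) := pvMem_key_le r' j hmem'
      have hfin : pvPKey hd ≤ pvPKey (w, j) := by
        rw [hw]
        exact le_trans hle1 hle2
      rw [hhd] at hfin
      exact hfin
    have hmemhd : ((-(pvRoot r).1 : Int), (pvRoot r).2) ∈ heap := hV _ _ hdist_hd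
    cases heap with
    | nil => exact absurd hmemhd (by simp)
    | cons hh ht =>
    cases fuel with
    | zero => simp at hfuel
    | succ fuel =>
    have hpop := pvPopLoop_spec (hh :: ht).length dist (hh :: ht) (pvRoot r).2 (pvRoot r).1
      (le_refl _) hhn hS hV hdist_hd hsel
    have hget1 : ∀ j, (dist.erase (pvRoot r).2).get? j =
        if j = (pvRoot r).2 then none else dist.get? j := fun j => pvGet?_erase dist _ j
    have hkn1 : (dist.erase (pvRoot r).2).keys.Nodup := by
      rw [pvKeys_erase]
      exact hkn.filter _
    have hkeysex : ∀ k ∈ (dist.erase (pvRoot r).2).keys,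
        ∃ w, (dist.erase (pvRoot r).2).get? k = some w :=
      fun k hk => (pvMem_keys_iff _ k).1 hk
    have hnd1 : ((hh :: ht).filter (fun x => pvKeyLt (-(pvRoot r).1, (pvRoot r).2) x)).Nodup :=
      hhn.filter _
    have hstale1 : ∀ x ∈ (hh :: ht).filter (fun x => pvKeyLt (-(pvRoot r).1, (pvRoot r).2) x),
        ∃ w, (dist.erase (pvRoot r).2).get? x.2 = some w ∧ w ≤ -x.1 := by
      intro x hx
      have hxh : x ∈ hh :: ht := List.mem_of_mem_filter hx
      obtain ⟨w, hw, hwle⟩ := hS x hxh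
      have hxc : x.2 ≠ (pvRoot r).2 := by
        intro hcon
        rw [hcon] at hw
        have hwv : w = (pvRoot r).1 := Option.some_inj.1 (hw.symm.trans hdist_hd)
        have hflt := List.of_mem_filter hx
        have hlt := (pvKeyLt_iff _ _).1 hflt
        rw [pvLex_lt_iff] at hlt
        rcases hlt with h | ⟨h1, h2⟩
        · dsimp only at h
          omega
        · dsimp only at h1 h2
          omega
      rw [hget1, if_neg hxc]
      exact ⟨w, hw, hwle⟩
    obtain ⟨u1, u2, u3, u4, u5, u6, u7⟩ := pvUpd_spec (pvRoot r).2
      (dist.erase (pvRoot r).2).keys (dist.erase (pvRoot r).2)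
      ((hh :: ht).filter (fun x => pvKeyLt (-(pvRoot r).1, (pvRoot r).2) x))
      hkn1 hkeysex hnd1 hstale1
    have hWF' : pvWF N (RS₁ ++ (pvChildren r ++ RS₂)) := pvWF_split N RS₁ RS₂ r (hRS ▸ hWF)
    have hsepr : ∀ r'', r'' ∈ RS₁ ∨ r'' ∈ RS₂ → pvSep r r'' := by
      intro r'' h''
      have hpw := hWF.1
      rw [hRS, List.pairwise_append] at hpw
      rcases h'' with h1 | h2
      · exact pvSep_symm _ _ (hpw.2.2 r'' h1 r (List.mem_cons_self ..))
      · exact (List.pairwise_cons.1 hpw.2.1).1 r'' h2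
    have holdmem : ∀ r'', r'' ∈ RS₁ ∨ r'' ∈ RS₂ → r'' ∈ RS := by
      intro r'' h''
      rw [hRS]
      rcases h'' with h1 | h2
      · exact List.mem_append.2 (Or.inl h1)
      · exact List.mem_append.2 (Or.inr (List.mem_cons_of_mem _ h2))
    have hD' : pvDistOK (RS₁ ++ (pvChildren r ++ RS₂))
        ((dist.erase (pvRoot r).2).keys.foldl (pvUpdStep (pvRoot r).2)
          (dist.erase (pvRoot r).2,
            (hh :: ht).filter (fun x => pvKeyLt (-(pvRoot r).1, (pvRoot r).2) x))).1 := by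
      constructor
      · intro r'' hr'' j hmem''
        have hcase : (r'' ∈ RS₁ ∨ r'' ∈ RS₂) ∨ r'' ∈ pvChildren r := by
          rcases List.mem_append.1 hr'' with h1 | h12
          · exact Or.inl (Or.inl h1)
          · rcases List.mem_append.1 h12 with hch | h2
            · exact Or.inr hch
            · exact Or.inl (Or.inr h2)
        rcases hcase with hold | hchild
        · have hrRS : r'' ∈ RS := holdmem r'' hold
          have holdg : dist.get? j = some (pvDelta r'' j) := hD.1 r'' hrRS j hmem''
          have hjc : j ≠ (pvRoot r).2 :=
            fun hcon => pvSep_disjoint r r'' _ (hsepr r'' hold) hrootm (hcon ▸ hmem'')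
          have h1d : (dist.erase (pvRoot r).2).get? j = some (pvDelta r'' j) := by
            rw [hget1, if_neg hjc]
            exact holdg
          have hjk : j ∈ (dist.erase (pvRoot r).2).keys := (pvMem_keys_iff _ _).2 ⟨_, h1d⟩
          have hres := u1 j _ h1d
          rw [if_pos hjk] at hres
          have hge : pvDelta r'' j ≤ |j - (pvRoot r).2| :=
            pvSep_delta N r'' r j _ (pvSep_symm _ _ (hsepr r'' hold))
              (hWF.2 r'' hrRS) hOKr hmem'' hrootm
          rw [min_eq_left hge] at hres
          exact hres
        · obtain ⟨hmemp, hjc⟩ := pvChild_mem_parent r r'' j hchild hmem''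
          have holdg : dist.get? j = some (pvDelta r j) := hD.1 r hr j hmemp
          have h1d : (dist.erase (pvRoot r).2).get? j = some (pvDelta r j) := by
            rw [hget1, if_neg hjc]
            exact holdg
          have hjk : j ∈ (dist.erase (pvRoot r).2).keys := (pvMem_keys_iff _ _).2 ⟨_, h1d⟩
          have hres := u1 j _ h1d
          rw [if_pos hjk] at hres
          rw [pvChild_delta r r'' j hchild hmem''] at hres
          exact hres
      · intro j v hjv
        have hjk : j ∈ (dist.erase (pvRoot r).2).keys := by
          rw [← u3]
          exact (pvMem_keys_iff _ _).2 ⟨v, hjv⟩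
        obtain ⟨w1, hw1⟩ := (pvMem_keys_iff _ _).1 hjk
        have hjc : j ≠ (pvRoot r).2 := by
          intro hcon
          rw [hget1, if_pos hcon] at hw1
          cases hw1
        have hwold : dist.get? j = some w1 := by
          rw [hget1, if_neg hjc] at hw1
          exact hw1
        obtain ⟨r₀, hr₀, hmem₀⟩ := hD.2 j w1 hwold
        rw [hRS] at hr₀
        rcases List.mem_append.1 hr₀ with h1 | h2
        · exact ⟨r₀, List.mem_append.2 (Or.inl h1), hmem₀⟩
        rcases List.mem_cons.1 h2 with he | h3
        · obtain ⟨cc, hcc, hmemc⟩ := pvSplit_mem r j (he ▸ hmem₀) hjc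
          exact ⟨cc, List.mem_append.2 (Or.inr (List.mem_append.2 (Or.inl hcc))), hmemc⟩
        · exact ⟨r₀, List.mem_append.2 (Or.inr (List.mem_append.2 (Or.inr h3))), hmem₀⟩
    have hV' : pvValid
        ((dist.erase (pvRoot r).2).keys.foldl (pvUpdStep (pvRoot r).2)
          (dist.erase (pvRoot r).2,
            (hh :: ht).filter (fun x => pvKeyLt (-(pvRoot r).1, (pvRoot r).2) x))).1
        ((dist.erase (pvRoot r).2).keys.foldl (pvUpdStep (pvRoot r).2)
          (dist.erase (pvRoot r).2,
            (hh :: ht).filter (fun x => pvKeyLt (-(pvRoot r).1, (pvRoot r).2) x))).2 := by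
      intro i v hiv
      have hik : i ∈ (dist.erase (pvRoot r).2).keys := by
        rw [← u3]
        exact (pvMem_keys_iff _ _).2 ⟨v, hiv⟩
      obtain ⟨w1, hw1⟩ := (pvMem_keys_iff _ _).1 hik
      have hres := u1 i w1 hw1
      rw [if_pos hik] at hres
      have hveq : v = min w1 |i - (pvRoot r).2| := by
        rw [hiv] at hres
        exact Option.some_inj.1 hres
      by_cases habs : |i - (pvRoot r).2| < w1
      · have hpush := u5 i hik w1 hw1 habs
        have hveq2 : v = |i - (pvRoot r).2| := by
          rw [hveq]
          exact min_eq_right (le_of_lt habs)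
        rw [hveq2]
        exact hpush
      · have hveq2 : v = w1 := by
          rw [hveq]
          exact min_eq_left (by omega)
        have hic : i ≠ (pvRoot r).2 := by
          intro hcon
          rw [hget1, if_pos hcon] at hw1
          cases hw1
        have hwold : dist.get? i = some w1 := by
          rw [hget1, if_neg hic] at hw1
          exact hw1
        have hmemold : ((-w1 : Int), i) ∈ hh :: ht := hV i w1 hwold
        have hlt : toLex ((-(pvRoot r).1 : Int), (pvRoot r).2) < toLex ((-w1 : Int), i) := by
          rcases lt_or_eq_of_le (hsel i w1 hwold) with h | h
          · exact h
          · exfalso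
            have heq2 : (pvRoot r).2 = i := congrArg Prod.snd (toLex.injective h)
            exact hic heq2.symm
        have hmem1 : ((-w1 : Int), i) ∈
            (hh :: ht).filter (fun x => pvKeyLt (-(pvRoot r).1, (pvRoot r).2) x) :=
          List.mem_filter.2 ⟨hmemold, (pvKeyLt_iff _ _).2 hlt⟩
        rw [hveq2]
        exact u4 _ hmem1
    have hkn' :
        ((dist.erase (pvRoot r).2).keys.foldl (pvUpdStep (pvRoot r).2)
          (dist.erase (pvRoot r).2,
            (hh :: ht).filter (fun x => pvKeyLt (-(pvRoot r).1, (pvRoot r).2) x))).1.keys.Nodup := by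
      rw [u3]
      exact hkn1
    have hsplit : (RS.flatMap pvRPicks).Perm
        (hd :: (RS₁ ++ (pvChildren r ++ RS₂)).flatMap pvRPicks) := by
      rw [hRS]
      simp only [List.flatMap_append, List.flatMap_cons]
      rw [pvRPicks_eq r hne, ← hhd]
      have hassoc : RS₁.flatMap pvRPicks ++ ((hd :: (pvChildren r).flatMap pvRPicks) ++ RS₂.flatMap pvRPicks) =
          RS₁.flatMap pvRPicks ++ (hd :: ((pvChildren r).flatMap pvRPicks ++ RS₂.flatMap pvRPicks)) := by
        simp
      rw [hassoc]
      exact List.perm_middle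
    have hperm' : rest'.Perm ((RS₁ ++ (pvChildren r ++ RS₂)).flatMap pvRPicks) :=
      (hperm.trans hsplit).cons_inv
    have hsort' := (List.pairwise_cons.1 hsort).2
    have hfuel' : rest'.length ≤ fuel := by
      simp at hfuel
      omega
    have hrec := ih (RS := RS₁ ++ (pvChildren r ++ RS₂))
      (dist := ((dist.erase (pvRoot r).2).keys.foldl (pvUpdStep (pvRoot r).2)
        (dist.erase (pvRoot r).2,
          (hh :: ht).filter (fun x => pvKeyLt (-(pvRoot r).1, (pvRoot r).2) x))).1)
      (heap := ((dist.erase (pvRoot r).2).keys.foldl (pvUpdStep (pvRoot r).2)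
        (dist.erase (pvRoot r).2,
          (hh :: ht).filter (fun x => pvKeyLt (-(pvRoot r).1, (pvRoot r).2) x))).2)
      (chosen := chosen ++ [(pvRoot r).2]) (fuel := fuel)
      hWF' hD' hkn' hV' u6 u7 hperm' hsort' hfuel'
    show pvLoopA (fuel+1) dist (hh :: ht) chosen = chosen ++ (hd :: rest').map (·.2)
    simp only [pvLoopA]
    rw [hpop]
    simp only []
    rw [hrec]
    rw [hhd]
    simp
  

-- ---- sorted2 bridge ----
lemma pvSorted2_before_eq :
    (fun (a b : Int × Int) =>
      (decide ((fun t : Int × Int => -t.1) a < (fun t : Int × Int => -t.1) b) ||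
        (!decide ((fun t : Int × Int => -t.1) b < (fun t : Int × Int => -t.1) a) &&
          decide ((fun t : Int × Int => t.2) a < (fun t : Int × Int => t.2) b)))) =
    (fun a b => decide (pvPKey a < pvPKey b)) := by
  funext a b
  have hd2 : decide (pvPKey a < pvPKey b) =
      decide (b.1 < a.1 ∨ (a.1 = b.1 ∧ a.2 < b.2)) :=
    decide_eq_decide.2 (pvPKey_lt_iff a b)
  rw [hd2]
  by_cases h1 : b.1 < a.1
  · have hx : (-a.1 : Int) < -b.1 := by omega
    simp [hx, h1]
  · have hn1 : ¬ (-a.1 : Int) < -b.1 := by omega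
    by_cases h2 : a.1 = b.1
    · have hn2 : ¬ (-b.1 : Int) < -a.1 := by omega
      by_cases h3 : a.2 < b.2 <;> simp [hn1, hn2, h1, h2, h3]
    · have h4 : (-b.1 : Int) < -a.1 := by omega
      have h5 : ¬ (b.1 < a.1 ∨ (a.1 = b.1 ∧ a.2 < b.2)) := by omega
      simp [hn1, h4, h5]

lemma pvFoldl_insertBy_pairwise (ys : List (Int × Int)) (acc : List (Int × Int))
    (hacc : acc.Pairwise (fun a b => pvPKey a ≤ pvPKey b)) :
    (ys.foldl (fun acc x =>
        PySem.List.insertBy (fun a b => decide (pvPKey a < pvPKey b)) x acc) acc).Pairwise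
      (fun a b => pvPKey a ≤ pvPKey b) := by
  induction ys generalizing acc with
  | nil => exact hacc
  | cons y ys ih =>
    rw [List.foldl_cons]
    exact ih _ (PySem.List.insertBy_pairwise_le pvPKey y acc hacc)

lemma pvSorted2_pairwise (xs : List (Int × Int)) :
    (PySem.List.sorted2 xs (fun t => -t.1) (fun t => t.2) false).Pairwise
      (fun a b => pvPKey a ≤ pvPKey b) := by
  have hunf : PySem.List.sorted2 xs (fun t => -t.1) (fun t => t.2) false =
      xs.foldl (fun acc x =>
        PySem.List.insertBy (fun a b => decide (pvPKey a < pvPKey b)) x acc) [] := by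
    simp only [PySem.List.sorted2, Bool.false_eq_true, if_false]
    rw [pvSorted2_before_eq]
  rw [hunf]
  exact pvFoldl_insertBy_pairwise xs [] (by simp)

-- ---- initial state ----
lemma pvInit_items (N start : Int) :
    (((PySem.List.pyRange 0 N 1).filter (fun i => decide (i ≠ start))).foldl
        (fun d i => d.insert i |i - start|) PySem.Dict.empty).items =
      ((PySem.List.pyRange 0 N 1).filter (fun i => decide (i ≠ start))).map
        (fun i => (i, |i - start|)) := by
  have hfresh : ∀ a ∈ (PySem.List.pyRange 0 N 1).filter (fun i => decide (i ≠ start)),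
      (PySem.Dict.empty : PySem.Dict Int Int).contains a = false := by
    intro a _
    simp [PySem.Dict.contains_empty]
  have hnd : (((PySem.List.pyRange 0 N 1).filter (fun i => decide (i ≠ start))).map
      (fun i : Int => i)).Nodup := by
    have h1 : ((PySem.List.pyRange 0 N 1).filter (fun i => decide (i ≠ start))).Nodup :=
      (PySem.List.nodup_pyRange_one 0 N).filter _
    simpa using h1
  have h := PySem.Dict.items_foldl_insert_fresh
    ((PySem.List.pyRange 0 N 1).filter (fun i => decide (i ≠ start)))
    (fun i : Int => i) (fun i : Int => |i - start|) PySem.Dict.empty hfresh hnd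
  simpa using h

-- ===== VERDICT (by name: the statement is the Claim_ definition above) =====
-- ---- initial-state facts and final assembly ----
lemma pvTop (N start : Int) (hpre1 : 0 ≤ start) (hpre2 : start < N) :
    pvLoopA
      (((PySem.List.pyRange 0 N 1).filter (fun i => decide (i ≠ start))).foldl
        (fun d i => d.insert i |i - start|) PySem.Dict.empty).items.length
      (((PySem.List.pyRange 0 N 1).filter (fun i => decide (i ≠ start))).foldl
        (fun d i => d.insert i |i - start|) PySem.Dict.empty)
      ((((PySem.List.pyRange 0 N 1).filter (fun i => decide (i ≠ start))).foldl
        (fun d i => d.insert i |i - start|) PySem.Dict.empty).items.map (fun p => (-p.2, p.1)))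
      [start] =
    start :: (PySem.List.sorted2
      ((if 0 < start then (start, 0) :: pvPicksI 0 start else []) ++
        (if start < N - 1 then (N - 1 - start, N - 1) :: pvPicksI start (N - 1) else []))
      (fun t => -t.1) (fun t => t.2)).map (fun t => t.2) := by
  have hndl : ((PySem.List.pyRange 0 N 1).filter (fun i => decide (i ≠ start))).Nodup :=
    (PySem.List.nodup_pyRange_one 0 N).filter _
  have hmeml : ∀ j : Int,
      j ∈ (PySem.List.pyRange 0 N 1).filter (fun i => decide (i ≠ start)) ↔
        (0 ≤ j ∧ j < N ∧ j ≠ start) := by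
    intro j
    simp [List.mem_filter, PySem.List.mem_pyRange_one]
    tauto
  have hitems := pvInit_items N start
  have hget0 : ∀ j,
      (((PySem.List.pyRange 0 N 1).filter (fun i => decide (i ≠ start))).foldl
        (fun d i => d.insert i |i - start|) PySem.Dict.empty).get? j =
      if j ∈ (PySem.List.pyRange 0 N 1).filter (fun i => decide (i ≠ start))
        then some |j - start| else none := by
    intro j
    have hsplit : (((PySem.List.pyRange 0 N 1).filter (fun i => decide (i ≠ start))).foldl
        (fun d i => d.insert i |i - start|) PySem.Dict.empty) =
        PySem.Dict.mk (((PySem.List.pyRange 0 N 1).filter (fun i => decide (i ≠ start))).map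
          (fun i => (i, |i - start|))) := by
      rw [← hitems]
    rw [hsplit]
    exact pvGet?_of_items_map _ _ j
  have hkeys0 :
      (((PySem.List.pyRange 0 N 1).filter (fun i => decide (i ≠ start))).foldl
        (fun d i => d.insert i |i - start|) PySem.Dict.empty).keys =
      (PySem.List.pyRange 0 N 1).filter (fun i => decide (i ≠ start)) := by
    simp only [PySem.Dict.keys, hitems, List.map_map]
    have hcomp : ((fun x : Int × Int => x.1) ∘ fun i : Int => (i, |i - start|)) = id := rfl
    rw [hcomp, List.map_id]
  -- initial region list
  have hWF₀ : pvWF N ((if 0 < start then [pvReg.L start] else []) ++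
      (if start < N - 1 then [pvReg.R start (N - 1)] else [])) := by
    constructor
    · by_cases h1 : 0 < start <;> by_cases h2 : start < N - 1 <;>
        simp [h1, h2, pvSep, pvLo, pvHi]
    · intro r hrr
      rcases List.mem_append.1 hrr with h | h
      · split at h
        · next h1 =>
          simp only [List.mem_singleton] at h
          subst h
          show 0 < start ∧ start ≤ N
          omega
        · simp at h
      · split at h
        · next h2 =>
          simp only [List.mem_singleton] at h
          subst h
          exact ⟨by omega, by omega, rfl⟩
        · simp at h
  have habs1 : ∀ j : Int, j < start → |j - start| = start - j := by
    intro j hj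
    rcases abs_cases (j - start) with ⟨he, hs⟩ | ⟨he, hs⟩ <;> omega
  have habs2 : ∀ j : Int, start < j → |j - start| = j - start := by
    intro j hj
    rcases abs_cases (j - start) with ⟨he, hs⟩ | ⟨he, hs⟩ <;> omega
  have hD₀ : pvDistOK ((if 0 < start then [pvReg.L start] else []) ++
      (if start < N - 1 then [pvReg.R start (N - 1)] else []))
      (((PySem.List.pyRange 0 N 1).filter (fun i => decide (i ≠ start))).foldl
        (fun d i => d.insert i |i - start|) PySem.Dict.empty) := by
    constructor
    · intro r hrr j hmem
      have hrr' : r = pvReg.L start ∨ r = pvReg.R start (N - 1) := by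
        rcases List.mem_append.1 hrr with h | h <;> (split at h <;> simp at h) <;> tauto
      rw [hget0]
      rcases hrr' with rfl | rfl
      · simp only [pvMem] at hmem
        rw [if_pos ((hmeml j).2 (by omega))]
        simp only [pvDelta]
        rw [habs1 j (by omega)]
      · simp only [pvMem] at hmem
        rw [if_pos ((hmeml j).2 (by omega))]
        simp only [pvDelta]
        rw [habs2 j (by omega)]
    · intro j v hjv
      rw [hget0] at hjv
      split at hjv
      · next hin =>
        have hj := (hmeml j).1 hin
        by_cases hlt : j < start
        · refine ⟨pvReg.L start, ?_, ?_⟩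
          · exact List.mem_append.2 (Or.inl (by simp [show 0 < start from by omega]))
          · simp only [pvMem]; omega
        · refine ⟨pvReg.R start (N - 1), ?_, ?_⟩
          · exact List.mem_append.2 (Or.inr (by simp [show start < N - 1 from by omega]))
          · simp only [pvMem]; omega
      · cases hjv
  have hkn₀ : (((PySem.List.pyRange 0 N 1).filter (fun i => decide (i ≠ start))).foldl
      (fun d i => d.insert i |i - start|) PySem.Dict.empty).keys.Nodup := by
    rw [hkeys0]
    exact hndl
  have hheap0 : (((PySem.List.pyRange 0 N 1).filter (fun i => decide (i ≠ start))).foldl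
      (fun d i => d.insert i |i - start|) PySem.Dict.empty).items.map (fun p => (-p.2, p.1)) =
      ((PySem.List.pyRange 0 N 1).filter (fun i => decide (i ≠ start))).map
        (fun i => (-(|i - start|), i)) := by
    rw [hitems, List.map_map]
    rfl
  have hV₀ : pvValid
      (((PySem.List.pyRange 0 N 1).filter (fun i => decide (i ≠ start))).foldl
        (fun d i => d.insert i |i - start|) PySem.Dict.empty)
      ((((PySem.List.pyRange 0 N 1).filter (fun i => decide (i ≠ start))).foldl
        (fun d i => d.insert i |i - start|) PySem.Dict.empty).items.map (fun p => (-p.2, p.1))) := by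
    intro i v hiv
    rw [hget0] at hiv
    split at hiv
    · next hin =>
      have hv : v = |i - start| := Option.some_inj.1 hiv.symm
      rw [hheap0, hv]
      exact List.mem_map.2 ⟨i, hin, rfl⟩
    · cases hiv
  have hS₀ : pvStale
      (((PySem.List.pyRange 0 N 1).filter (fun i => decide (i ≠ start))).foldl
        (fun d i => d.insert i |i - start|) PySem.Dict.empty)
      ((((PySem.List.pyRange 0 N 1).filter (fun i => decide (i ≠ start))).foldl
        (fun d i => d.insert i |i - start|) PySem.Dict.empty).items.map (fun p => (-p.2, p.1))) := by
    intro x hx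
    rw [hheap0] at hx
    obtain ⟨i, hi, hxi⟩ := List.mem_map.1 hx
    refine ⟨|i - start|, ?_, ?_⟩
    · rw [← hxi]
      rw [hget0, if_pos hi]
    · rw [← hxi]
      simp
  have hhn₀ : ((((PySem.List.pyRange 0 N 1).filter (fun i => decide (i ≠ start))).foldl
      (fun d i => d.insert i |i - start|) PySem.Dict.empty).items.map
        (fun p => (-p.2, p.1))).Nodup := by
    rw [hheap0]
    exact hndl.map (fun a b hab => congrArg Prod.snd hab)
  -- keyed = flatMap of initial regions
  have hkeyed : ((if 0 < start then (start, 0) :: pvPicksI 0 start else []) ++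
      (if start < N - 1 then (N - 1 - start, N - 1) :: pvPicksI start (N - 1) else [])) =
      ((if 0 < start then [pvReg.L start] else []) ++
        (if start < N - 1 then [pvReg.R start (N - 1)] else [])).flatMap pvRPicks := by
    by_cases h1 : 0 < start <;> by_cases h2 : start < N - 1 <;>
      simp [h1, h2, pvRPicks]
  have hkeyedsnd : (((if 0 < start then (start, 0) :: pvPicksI 0 start else []) ++
      (if start < N - 1 then (N - 1 - start, N - 1) :: pvPicksI start (N - 1) else [])).map
        (fun t : Int × Int => t.2)).Nodup := by
    rw [List.map_append]
    apply List.Nodup.append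
    · by_cases h1 : 0 < start
      · rw [if_pos h1]
        exact pvRPicks_snd_nodup (pvReg.L start)
      · rw [if_neg h1]; simp
    · by_cases h2 : start < N - 1
      · rw [if_pos h2]
        exact pvRPicks_snd_nodup (pvReg.R start (N - 1))
      · rw [if_neg h2]; simp
    · intro x hx1 hx2
      split at hx1 <;> split at hx2 <;> simp [pvPicksI_mem_iff] at hx1 hx2 <;> omega
  have hkeyednd : ((if 0 < start then (start, 0) :: pvPicksI 0 start else []) ++
      (if start < N - 1 then (N - 1 - start, N - 1) :: pvPicksI start (N - 1) else [])).Nodup :=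
    List.Nodup.of_map _ hkeyedsnd
  have hperm₀ := PySem.List.sorted2_perm
    ((if 0 < start then (start, 0) :: pvPicksI 0 start else []) ++
      (if start < N - 1 then (N - 1 - start, N - 1) :: pvPicksI start (N - 1) else []))
    (fun t : Int × Int => -t.1) (fun t : Int × Int => t.2) false
  have hrestnd := hperm₀.symm.nodup hkeyednd
  have hsort₀ : (PySem.List.sorted2
      ((if 0 < start then (start, 0) :: pvPicksI 0 start else []) ++
        (if start < N - 1 then (N - 1 - start, N - 1) :: pvPicksI start (N - 1) else []))
      (fun t => -t.1) (fun t => t.2) false).Pairwise (fun p q => pvPKey p < pvPKey q) := by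
    have hle := pvSorted2_pairwise
      ((if 0 < start then (start, 0) :: pvPicksI 0 start else []) ++
        (if start < N - 1 then (N - 1 - start, N - 1) :: pvPicksI start (N - 1) else []))
    have hne : (PySem.List.sorted2
        ((if 0 < start then (start, 0) :: pvPicksI 0 start else []) ++
          (if start < N - 1 then (N - 1 - start, N - 1) :: pvPicksI start (N - 1) else []))
        (fun t => -t.1) (fun t => t.2) false).Pairwise (fun a b => a ≠ b) := hrestnd
    exact (hle.and hne).imp (fun {a b} h =>
      lt_of_le_of_ne h.1 (fun hc => h.2 (pvPKey_inj hc)))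
  have hmemkeyed : ∀ j : Int,
      (j ∈ ((if 0 < start then (start, 0) :: pvPicksI 0 start else []) ++
        (if start < N - 1 then (N - 1 - start, N - 1) :: pvPicksI start (N - 1) else [])).map
          (fun t : Int × Int => t.2)) ↔ (0 ≤ j ∧ j < N ∧ j ≠ start) := by
    intro j
    by_cases h1 : 0 < start <;> by_cases h2 : start < N - 1 <;>
      simp [h1, h2, pvPicksI_mem_iff] <;> omega
  have hpermsnd : (((if 0 < start then (start, 0) :: pvPicksI 0 start else []) ++
      (if start < N - 1 then (N - 1 - start, N - 1) :: pvPicksI start (N - 1) else [])).map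
        (fun t : Int × Int => t.2)).Perm
      ((PySem.List.pyRange 0 N 1).filter (fun i => decide (i ≠ start))) := by
    rw [List.perm_ext_iff_of_nodup hkeyedsnd hndl]
    intro j
    rw [hmemkeyed, hmeml]
  have hfuel₀ : (PySem.List.sorted2
      ((if 0 < start then (start, 0) :: pvPicksI 0 start else []) ++
        (if start < N - 1 then (N - 1 - start, N - 1) :: pvPicksI start (N - 1) else []))
      (fun t => -t.1) (fun t => t.2) false).length ≤
      (((PySem.List.pyRange 0 N 1).filter (fun i => decide (i ≠ start))).foldl
        (fun d i => d.insert i |i - start|) PySem.Dict.empty).items.length := by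
    rw [hperm₀.length_eq, hitems, List.length_map, ← hpermsnd.length_eq, List.length_map]
  have hfin := pvMaster N
    ((((PySem.List.pyRange 0 N 1).filter (fun i => decide (i ≠ start))).foldl
      (fun d i => d.insert i |i - start|) PySem.Dict.empty).items.length)
    ((if 0 < start then [pvReg.L start] else []) ++
      (if start < N - 1 then [pvReg.R start (N - 1)] else []))
    (((PySem.List.pyRange 0 N 1).filter (fun i => decide (i ≠ start))).foldl
      (fun d i => d.insert i |i - start|) PySem.Dict.empty)
    ((((PySem.List.pyRange 0 N 1).filter (fun i => decide (i ≠ start))).foldl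
      (fun d i => d.insert i |i - start|) PySem.Dict.empty).items.map (fun p => (-p.2, p.1)))
    [start]
    (PySem.List.sorted2
      ((if 0 < start then (start, 0) :: pvPicksI 0 start else []) ++
        (if start < N - 1 then (N - 1 - start, N - 1) :: pvPicksI start (N - 1) else []))
      (fun t => -t.1) (fun t => t.2) false)
    hWF₀ hD₀ hkn₀ hV₀ hS₀ hhn₀ (by rw [hkeyed] at hperm₀ ⊢; exact hperm₀) hsort₀ hfuel₀
  rw [hfin]
  rfl

theorem max_spread_permutation_pq_spec : Claim_equal_max_spread_permutation_pq := by
  unfold Claim_equal_max_spread_permutation_pq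
  intro N start hdom hpre
  obtain ⟨hpre1, hpre2⟩ := hpre
  unfold Spec_max_spread_permutation_pq
  unfold max_spread_permutation_pq max_spread_permutation_pq_alt
  rw [if_pos ⟨hpre1, hpre2⟩, if_pos ⟨hpre1, hpre2⟩]
  exact pvTop N start hpre1 hpre2
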